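-- pv_equiv track=rewrite | github.com/stevenliu216/challenges | challenges/challenge27.py | reach_the_finish
-- ===== SOURCE A (Python) =====
-- from typing import List
--
-- def reach_the_finish(batteries: List[int]) -> bool:
--     current_batt = batteries[0]
--     road_length = len(batteries)
--     if road_length > 1:
--         for pos in range(road_length - 1):
--             battery_on_road = batteries[pos]
--             if battery_on_road > current_batt:
--                 current_batt = battery_on_road
--             if current_batt == 0:
--                 return False
--             current_batt -= 1
--     return True
-- ===== SOURCE B (Python) =====
-- def reach_the_finish(batteries):
--     # declarative nested-scan check: the walk fails exactly at a position pos
--     # (before the last cell) where the best pickup so far, batteries[j] + j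
--     # over j <= pos, is exactly pos; no simulated battery state is kept
--     n = len(batteries)
--     return not any(
--         max(batteries[j] + j for j in range(pos + 1)) == pos
--         for pos in range(n - 1)
--     )
-- ===== Notes on version B (the rewrite author's own statement) =====
-- stated objective: alternative
-- what changed: B replaces A's stateful single-pass simulation of a decrementing battery by a stateless declarative nested scan: for each position before the last it recomputes max(batteries[j]+j for j<=pos) from scratch and returns not any(that max == pos), keeping no running state at all.
import Mathlib
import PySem

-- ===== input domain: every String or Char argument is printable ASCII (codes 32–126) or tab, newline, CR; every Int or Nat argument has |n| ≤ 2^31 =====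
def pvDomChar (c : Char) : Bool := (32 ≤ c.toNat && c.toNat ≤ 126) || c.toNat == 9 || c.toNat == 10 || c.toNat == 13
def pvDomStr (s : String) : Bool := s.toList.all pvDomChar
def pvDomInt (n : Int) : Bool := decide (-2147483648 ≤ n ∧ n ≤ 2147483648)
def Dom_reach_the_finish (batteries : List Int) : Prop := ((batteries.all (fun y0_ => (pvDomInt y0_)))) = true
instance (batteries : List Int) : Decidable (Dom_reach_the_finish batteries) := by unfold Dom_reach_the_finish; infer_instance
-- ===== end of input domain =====

-- B is a stateless declarative nested-scan re-check of A's walk (no running battery state); return value only.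

-- ===== PORT A =====
-- the for-loop of A: current battery level `c`, remaining positions `poss` (all in range under Pre_,
-- so pyGetD's default is never used)
def reachLoopA (batteries : List Int) : Int → List Int → Bool
  | _, [] => true
  | c, pos :: rest =>
    let b := PySem.List.pyGetD batteries pos 0
    let c := if b > c then b else c
    if c == 0 then false else reachLoopA batteries (c - 1) rest

def reach_the_finish (batteries : List Int) : Bool :=
  match PySem.List.pyGet? batteries 0 with
  | none => false   -- IndexError on empty input: excluded by Pre_
  | some current_batt =>
    let road_length : Int := batteries.length
    if road_length > 1 then
      reachLoopA batteries current_batt (PySem.List.pyRange 0 (road_length - 1) 1)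
    else true

-- ===== PORT B =====
-- max(batteries[j] + j for j in range(pos + 1))
def prefMaxB (batteries : List Int) (pos : Int) : Option Int :=
  PySem.List.max? ((PySem.List.pyRange 0 (pos + 1) 1).map
    (fun j => PySem.List.pyGetD batteries j 0 + j)) (fun y => y)

-- the body of B's any(...): does the walk fail exactly at `pos`?
def failsAtB (batteries : List Int) (pos : Int) : Bool :=
  match prefMaxB batteries pos with
  | some m => m == pos
  | none => false   -- max() over an empty generator would raise; unreachable (pos ≥ 0)

def reach_the_finish_alt (batteries : List Int) : Bool :=
  !((PySem.List.pyRange 0 ((batteries.length : Int) - 1) 1).any (failsAtB batteries))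

-- ===== PRECONDITION & SPEC =====
-- A raises IndexError (batteries[0]) on the empty list; nothing else raises.
def Pre_reach_the_finish (batteries : List Int) : Prop := batteries ≠ []
instance (batteries : List Int) : Decidable (Pre_reach_the_finish batteries) := by unfold Pre_reach_the_finish; infer_instance
def pvWitness_reach_the_finish : List Int := [1, 0, 2]

def Spec_reach_the_finish (batteries : List Int) (out : Bool) : Prop := out = reach_the_finish_alt batteries
instance (batteries : List Int) (out : Bool) : Decidable (Spec_reach_the_finish batteries out) := by unfold Spec_reach_the_finish; infer_instance

-- ===== CLAIM (what is proved, stated in full; the proofs are below) =====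
def Claim_equal_reach_the_finish : Prop := ∀ (batteries : List Int), Dom_reach_the_finish batteries → Pre_reach_the_finish batteries → Spec_reach_the_finish batteries (reach_the_finish batteries)

-- ===== LEMMAS AND PROOFS =====

-- the mathematical prefix maximum of batteries[j] + j, by recursion on the position
def pmRec (g : Int → Int) : Nat → Int
  | 0 => g 0
  | k + 1 => max (pmRec g k) (g (k + 1))

-- B's from-scratch max over range(pos+1) computes exactly the prefix maximum
lemma prefMaxB_eq (batteries : List Int) (k : Nat) :
    prefMaxB batteries (k : Int)
      = some (pmRec (fun j => PySem.List.pyGetD batteries j 0 + j) k) := by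
  induction k with
  | zero =>
    unfold prefMaxB
    rw [show ((0:Nat):Int) + 1 = 0 + 1 from by norm_num,
        PySem.List.pyRange_one_singleton]
    simp [PySem.List.max?_id_cons, pmRec]
  | succ n ih =>
    unfold prefMaxB at ih ⊢
    rw [show (((n+1:Nat)):Int) + 1 = ((n:Int) + 1) + 1 from by push_cast; ring,
        PySem.List.pyRange_one_succ_right (by positivity)]
    rw [PySem.List.pyRange_one_cons (by positivity : (0:Int) < (n:Int)+1)] at ih ⊢
    simp only [List.map_append, List.map_cons, List.cons_append, PySem.List.max?_id_cons,
      Option.some.injEq, List.map_nil] at ih ⊢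
    rw [List.foldl_append, ih]
    simp [pmRec]

-- loop correspondence: entering A's loop at position p with battery c such that
-- max (c + p) (batteries[p] + p) is the prefix maximum at p, A's remaining loop
-- agrees with the negated 'any' over the remaining positions
lemma loop_agree (batteries : List Int) :
    ∀ (k pn : Nat) (c : Int),
      max (c + (pn : Int)) (PySem.List.pyGetD batteries (pn : Int) 0 + (pn : Int))
        = pmRec (fun j => PySem.List.pyGetD batteries j 0 + j) pn →
      reachLoopA batteries c (PySem.List.pyRange (pn : Int) ((pn : Int) + (k : Int)) 1)
        = !((PySem.List.pyRange (pn : Int) ((pn : Int) + (k : Int)) 1).any (failsAtB batteries)) := by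
  intro k
  induction k with
  | zero =>
    intro pn c _
    rw [show ((pn:Int)) + ((0:Nat):Int) = (pn:Int) from by push_cast; ring,
        PySem.List.pyRange_one_eq_nil (le_refl _)]
    rfl
  | succ n ih =>
    intro pn c hinv
    have hlt : (pn:Int) < (pn:Int) + ((n+1:Nat):Int) := by push_cast; omega
    rw [PySem.List.pyRange_one_cons hlt]
    have hsplit : (pn:Int) + ((n+1:Nat):Int) = ((pn+1:Nat):Int) + ((n:Nat):Int) := by
      push_cast; ring
    rw [hsplit]
    simp only [reachLoopA, List.any_cons]
    set b := PySem.List.pyGetD batteries (pn:Int) 0 with hb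
    have hfail : failsAtB batteries (pn:Int)
        = ((if b > c then b else c) + (pn:Int) == (pn:Int)) := by
      unfold failsAtB
      rw [prefMaxB_eq batteries pn]
      have : pmRec (fun j => PySem.List.pyGetD batteries j 0 + j) pn
          = (if b > c then b else c) + (pn:Int) := by
        rw [← hinv]; split_ifs with h <;> omega
      rw [this]
    by_cases hz : (if b > c then b else c) = 0
    · have h1 : ((if b > c then b else c) == 0) = true := by simp [hz]
      have h2 : failsAtB batteries (pn:Int) = true := by
        rw [hfail, hz]; simp
      rw [h1, h2]; simp
    · have h1 : ((if b > c then b else c) == 0) = false := by simp [hz]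
      have h2 : failsAtB batteries (pn:Int) = false := by
        rw [hfail]
        simp only [beq_eq_false_iff_ne]
        split_ifs at hz ⊢ <;> omega
      rw [h1, h2]
      simp only [Bool.false_eq_true, if_false, Bool.false_or]
      apply ih (pn+1) ((if b > c then b else c) - 1)
      have hstep : pmRec (fun j => PySem.List.pyGetD batteries j 0 + j) (pn+1)
          = max (pmRec (fun j => PySem.List.pyGetD batteries j 0 + j) pn)
              (PySem.List.pyGetD batteries ((pn+1:Nat):Int) 0 + ((pn+1:Nat):Int)) := by
        simp [pmRec]
      rw [hstep, ← hinv]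
      push_cast
      split_ifs with h <;> omega

-- ===== VERDICT (by name: the statement is the Claim_ definition above) =====
theorem reach_the_finish_spec : Claim_equal_reach_the_finish := by
  intro batteries _ hpre
  unfold Spec_reach_the_finish reach_the_finish reach_the_finish_alt
  match hx : batteries, hpre with
  | x :: xs, _ =>
    simp only [PySem.List.pyGet?_zero_cons]
    set n : Int := ((x :: xs).length : Int) with hn
    have hn1 : 1 ≤ n := by simp [hn]
    by_cases h : n > 1
    · rw [if_pos h]
      have hinv : max (x + ((0:Nat):Int))
          (PySem.List.pyGetD (x :: xs) ((0:Nat):Int) 0 + ((0:Nat):Int))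
            = pmRec (fun j => PySem.List.pyGetD (x :: xs) j 0 + j) 0 := by
        simp [pmRec, PySem.List.pyGetD]
      have := loop_agree (x :: xs) (n - 1).toNat 0 x hinv
      rw [show ((0:Nat):Int) + (((n - 1).toNat : Nat) : Int) = n - 1 from by
        rw [Int.toNat_of_nonneg (by omega)]; push_cast; ring] at this
      rw [show ((0:Nat):Int) = (0:Int) from rfl] at this
      exact this
    · rw [if_neg h]
      have hn' : n = 1 := by omega
      rw [hn', show (1:Int) - 1 = 0 from rfl,
        PySem.List.pyRange_one_eq_nil (le_refl 0)]
      rfl
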